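-- pv_equiv track=rewrite | github.com/mnestis/advent2017 | 16/part1.py | perform_dance
-- ===== SOURCE A (Python) =====
-- def perform_dance(dance_steps):
--
--     dancers = [chr(i) for i in range(ord("a"), ord("q"))]
--
--     for step in dance_steps:
--         if step.startswith("s"):
--             offset = int(step[1:])
--             dancers = dancers[-offset:] + dancers[:-offset]
--         elif step.startswith("x"):
--             pos_a, pos_b = [int(x) for x in step[1:].split("/")]
--             dancers[pos_a], dancers[pos_b] = dancers[pos_b], dancers[pos_a]
--         elif step.startswith("p"):
--             dancer_a, dancer_b = step[1:].split("/")
--             pos_a, pos_b = dancers.index(dancer_a), dancers.index(dancer_b)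
--             dancers[pos_a], dancers[pos_b] = dancers[pos_b], dancers[pos_a]
--
--     return "".join(dancers)
-- ===== SOURCE B (Python) =====
-- def perform_dance(dance_steps):
--
--     cells = [chr(i) for i in range(ord("a"), ord("q"))]
--     offset = 0  # logical position 0 lives at physical index `offset`
--
--     for step in dance_steps:
--         if step.startswith("s"):
--             offset = (offset - int(step[1:])) % 16
--         elif step.startswith("x"):
--             parts = step[1:].split("/")
--             pos_a, pos_b = int(parts[0]), int(parts[1])
--             phys_a, phys_b = (pos_a + offset) % 16, (pos_b + offset) % 16
--             cells[phys_a], cells[phys_b] = cells[phys_b], cells[phys_a]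
--         elif step.startswith("p"):
--             dancer_a, dancer_b = step[1:].split("/")
--             cells = [dancer_b if c == dancer_a else
--                      dancer_a if c == dancer_b else c for c in cells]
--
--     return "".join(cells[offset:] + cells[:offset])
-- ===== Notes on version B (the rewrite author's own statement) =====
-- stated objective: alternative
-- what changed: Instead of slicing the whole list on every spin, B keeps the 16 dancers in a fixed array plus a rotation offset: an s step is an O(1) offset update, an x step swaps at offset-translated physical indices, a p step swaps the two names by a comprehension over values, and the string is read out once at the end starting from the offset.
-- outside the precondition, e.g. on perform_dance(['s20']): A returns 'abcdefghijklmnop', B returns 'mnopabcdefghijkl'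
import Mathlib
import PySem

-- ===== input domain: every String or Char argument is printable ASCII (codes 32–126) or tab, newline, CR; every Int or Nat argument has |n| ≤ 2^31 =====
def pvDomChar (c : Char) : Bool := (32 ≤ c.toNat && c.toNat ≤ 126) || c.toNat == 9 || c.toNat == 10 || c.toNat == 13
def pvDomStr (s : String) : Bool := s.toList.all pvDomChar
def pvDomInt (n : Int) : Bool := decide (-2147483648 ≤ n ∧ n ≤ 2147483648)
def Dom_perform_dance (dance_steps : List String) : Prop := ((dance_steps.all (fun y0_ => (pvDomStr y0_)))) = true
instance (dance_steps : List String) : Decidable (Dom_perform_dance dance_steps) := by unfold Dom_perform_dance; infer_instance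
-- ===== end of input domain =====

-- B replaces A's slice-rebuilding spin with a fixed array plus a rotation offset (spins are O(1)
-- offset arithmetic, swaps act at offset-translated physical indices, partner steps swap by value,
-- one wrapped read-out at the end): a different data representation, similar overall cost.

-- ===== PORT A =====
-- [chr(i) for i in range(ord("a"), ord("q"))]; chr is ported by hand as Char.ofNat (exact on 97..112)
def pvDancers0 : List String :=
  (PySem.List.pyRange 97 113 1).map (fun i => String.ofList [Char.ofNat i.toNat])

-- the body of A's `for step in dance_steps` loop
def pvStepA (dancers : List String) (step : String) : List String :=
  if PySem.Str.startswith step "s" then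
    -- Python raises ValueError if int(step[1:]) fails; Pre_ excludes that, so `.getD 0` is unreachable
    let offset := (PySem.Int.ofStr? (PySem.Str.slice step (some 1) none)).getD 0
    PySem.List.slice dancers (some (-offset)) none ++ PySem.List.slice dancers none (some (-offset))
  else if PySem.Str.startswith step "x" then
    match ((PySem.Str.split? (PySem.Str.slice step (some 1) none) "/").getD []).map PySem.Int.ofStr? with
    | [some pos_a, some pos_b] =>
        PySem.List.pySetD (PySem.List.pySetD dancers pos_a (PySem.List.pyGetD dancers pos_b ""))
          pos_b (PySem.List.pyGetD dancers pos_a "")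
    | _ => dancers   -- Python raises ValueError here (bad int or wrong arity); Pre_ excludes
  else if PySem.Str.startswith step "p" then
    match (PySem.Str.split? (PySem.Str.slice step (some 1) none) "/").getD [] with
    | [dancer_a, dancer_b] =>
        match PySem.List.index? dancers dancer_a, PySem.List.index? dancers dancer_b with
        | some pos_a, some pos_b =>
            PySem.List.pySetD
              (PySem.List.pySetD dancers (pos_a : Int) (PySem.List.pyGetD dancers (pos_b : Int) ""))
              (pos_b : Int) (PySem.List.pyGetD dancers (pos_a : Int) "")
        | _, _ => dancers  -- Python raises ValueError (name not found); Pre_ excludes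
    | _ => dancers  -- Python raises ValueError (unpacking); Pre_ excludes
  else dancers

def perform_dance (dance_steps : List String) : String :=
  PySem.Str.join "" (dance_steps.foldl pvStepA pvDancers0)

-- ===== PORT B =====
def pvCells0 : List String :=
  (PySem.List.pyRange 97 113 1).map (fun i => String.ofList [Char.ofNat i.toNat])

-- the body of B's loop over `(cells, offset)`
def pvStepB (st : List String × Int) (step : String) : List String × Int :=
  if PySem.Str.startswith step "s" then
    (st.1, PySem.Int.mod (st.2 - (PySem.Int.ofStr? (PySem.Str.slice step (some 1) none)).getD 0) 16)
  else if PySem.Str.startswith step "x" then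
    let parts := (PySem.Str.split? (PySem.Str.slice step (some 1) none) "/").getD []
    -- Python raises on a missing/unparsable part; Pre_ excludes that, so the defaults are unreachable
    let pos_a := (PySem.Int.ofStr? (PySem.List.pyGetD parts 0 "")).getD 0
    let pos_b := (PySem.Int.ofStr? (PySem.List.pyGetD parts 1 "")).getD 0
    let phys_a := PySem.Int.mod (pos_a + st.2) 16
    let phys_b := PySem.Int.mod (pos_b + st.2) 16
    (PySem.List.pySetD (PySem.List.pySetD st.1 phys_a (PySem.List.pyGetD st.1 phys_b ""))
       phys_b (PySem.List.pyGetD st.1 phys_a ""), st.2)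
  else if PySem.Str.startswith step "p" then
    match (PySem.Str.split? (PySem.Str.slice step (some 1) none) "/").getD [] with
    | [dancer_a, dancer_b] =>
        (st.1.map (fun c => if c == dancer_a then dancer_b else if c == dancer_b then dancer_a else c),
         st.2)
    | _ => st  -- Python raises ValueError (unpacking); Pre_ excludes
  else st

def perform_dance_alt (dance_steps : List String) : String :=
  let st := dance_steps.foldl pvStepB (pvCells0, 0)
  PySem.Str.join "" (PySem.List.slice st.1 (some st.2) none ++ PySem.List.slice st.1 none (some st.2))

-- ===== PRECONDITION & SPEC =====
def pvNames : List String :=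
  ["a","b","c","d","e","f","g","h","i","j","k","l","m","n","o","p"]

def pvStepOK (step : String) : Bool :=
  if PySem.Str.startswith step "s" then
    match PySem.Int.ofStr? (PySem.Str.slice step (some 1) none) with
    | some k => decide (-16 ≤ k ∧ k ≤ 16)
    | none => false
  else if PySem.Str.startswith step "x" then
    match ((PySem.Str.split? (PySem.Str.slice step (some 1) none) "/").getD []).map PySem.Int.ofStr? with
    | [some i, some j] => decide (-16 ≤ i ∧ i < 16 ∧ -16 ≤ j ∧ j < 16)
    | _ => false
  else if PySem.Str.startswith step "p" then
    match (PySem.Str.split? (PySem.Str.slice step (some 1) none) "/").getD [] with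
    | [a, b] => pvNames.contains a && pvNames.contains b
    | _ => false
  else true

-- Pre_ excludes malformed steps on which A raises (unparsable int, wrong number of '/'-parts,
-- x position out of range, p name that is not a dancer), and spin steps with |amount| > 16 —
-- a corner no dance specifies, where A's slice clamps the spin to a no-op while B wraps it mod 16.
def Pre_perform_dance (dance_steps : List String) : Prop :=
  (dance_steps.all pvStepOK) = true
instance (dance_steps : List String) : Decidable (Pre_perform_dance dance_steps) := by
  unfold Pre_perform_dance; infer_instance

def pvWitness_perform_dance : List String := ["s3", "x13/4", "pb/k"]

def Spec_perform_dance (dance_steps : List String) (out : String) : Prop := out = perform_dance_alt dance_steps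
instance (dance_steps : List String) (out : String) : Decidable (Spec_perform_dance dance_steps out) := by unfold Spec_perform_dance; infer_instance

-- ===== CLAIM (what is proved, stated in full; the proofs are below) =====
def Claim_equal_perform_dance : Prop := ∀ (dance_steps : List String), Dom_perform_dance dance_steps → Pre_perform_dance dance_steps → Spec_perform_dance dance_steps (perform_dance dance_steps)

-- ===== LEMMAS AND PROOFS =====

lemma pvNames_nodup : pvNames.Nodup := by decide

lemma pvDancers0_eq : pvDancers0 = pvNames := by decide

lemma pvCells0_eq : pvCells0 = pvNames := by decide

-- value transposition
def pvT (a b c : String) : String := if c = a then b else if c = b then a else c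

lemma pvT_inj (a b : String) : Function.Injective (pvT a b) := by
  intro x y h
  unfold pvT at h
  split_ifs at h <;> simp_all

-- swapping the entries at two indices of a duplicate-free list = transposing the two values
lemma pvSwap_eq_map (l : List String) (hnd : l.Nodup) (i j : Nat)
    (hi : i < l.length) (hj : j < l.length) :
    (l.set i (l[j]'hj)).set j (l[i]'hi) = l.map (pvT (l[i]'hi) (l[j]'hj)) := by
  refine List.ext_getElem (by simp) ?_
  intro k hk1 hk2
  have hk : k < l.length := by simpa using hk2
  have inj : ∀ {m n : Nat} (hm : m < l.length) (hn : n < l.length),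
      l[m]'hm = l[n]'hn → m = n :=
    fun _ _ h => (hnd.getElem_inj_iff).mp h
  simp only [List.getElem_set, List.getElem_map, pvT]
  by_cases h1 : j = k
  · subst h1
    rw [if_pos rfl]
    by_cases h2 : l[j]'hj = l[i]'hi
    · rw [if_pos h2]
      exact h2.symm
    · rw [if_neg h2, if_pos rfl]
  · by_cases h3 : i = k
    · subst h3
      rw [if_neg h1, if_pos rfl, if_pos rfl]
    · rw [if_neg h1, if_neg h3,
          if_neg (fun hh => h3 (inj hk hi hh).symm),
          if_neg (fun hh => h1 (inj hk hj hh).symm)]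

lemma pvMap_perm (d : List String) (hnd : d.Nodup) (a b : String) (ha : a ∈ d) (hb : b ∈ d) :
    List.Perm (d.map (pvT a b)) d := by
  have hsub : (d.map (pvT a b)) ⊆ d := by
    intro x hx
    rcases List.mem_map.mp hx with ⟨c, hc, rfl⟩
    unfold pvT
    split_ifs <;> assumption
  have hnd2 : (d.map (pvT a b)).Nodup := hnd.map (pvT_inj a b)
  exact (List.subperm_of_subset hnd2 hsub).perm_of_length_le (by simp)

-- Python indexing with an index in [-16, 16) on a 16-list reads/writes at (index mod 16)
lemma pvGet_idx (xs : List String) (i : Int) (h16 : xs.length = 16)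
    (hl : -16 ≤ i) (hr : i < 16) :
    PySem.List.pyGetD xs i "" = xs[(i % 16).toNat]'(by omega) := by
  rcases le_or_gt 0 i with h0 | h0
  · rw [PySem.List.pyGetD_eq_getElem xs "" h0 (by omega)]
    simp only [show (i % 16).toNat = i.toNat from by omega]
  · have e : PySem.List.pyGetD xs i "" = xs[xs.length - (-i).toNat]'(by omega) := by
      conv_lhs => rw [show i = -((((-i).toNat : Nat)) : Int) from by omega]
      exact PySem.List.pyGetD_neg_natCast xs (-i).toNat "" (by omega) (by omega)
    rw [e]
    simp only [show xs.length - (-i).toNat = (i % 16).toNat from by omega]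

lemma pvSet_idx (xs : List String) (i : Int) (v : String) (h16 : xs.length = 16)
    (hl : -16 ≤ i) (hr : i < 16) :
    PySem.List.pySetD xs i v = xs.set (i % 16).toNat v := by
  rcases le_or_gt 0 i with h0 | h0
  · rw [PySem.List.pySetD_of_nonneg xs v h0]
    simp only [show (i % 16).toNat = i.toNat from by omega]
  · have e : PySem.List.pySetD xs i v = xs.set (xs.length - (-i).toNat) v := by
      simp only [PySem.List.pySetD, PySem.List.pySet?, PySem.List.pyIdx?]
      rw [if_neg (by omega : ¬ (0:Int) ≤ i), if_pos (by omega : -(xs.length : Int) ≤ i)]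
      simp
    rw [e]
    simp only [show xs.length - (-i).toNat = (i % 16).toNat from by omega]

-- the index-swap written with Python primitives, as a transposition map
lemma pvPySwap_map (xs : List String) (hnd : xs.Nodup) (h16 : xs.length = 16) (i j : Int)
    (hi1 : -16 ≤ i) (hi2 : i < 16) (hj1 : -16 ≤ j) (hj2 : j < 16) :
    PySem.List.pySetD (PySem.List.pySetD xs i (PySem.List.pyGetD xs j ""))
        j (PySem.List.pyGetD xs i "")
      = xs.map (pvT (xs[(i % 16).toNat]'(by omega)) (xs[(j % 16).toNat]'(by omega))) := by
  rw [pvGet_idx xs j h16 hj1 hj2, pvGet_idx xs i h16 hi1 hi2,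
      pvSet_idx xs i _ h16 hi1 hi2,
      pvSet_idx (xs.set (i % 16).toNat (xs[(j % 16).toNat]'(by omega))) j _ (by simp [h16]) hj1 hj2]
  exact pvSwap_eq_map xs hnd (i % 16).toNat (j % 16).toNat (by omega) (by omega)

-- A's spin `dancers[-k:] + dancers[:-k]` is a left rotation by (-k) mod 16
lemma pvSliceRot (d : List String) (h16 : d.length = 16) (k : Int)
    (h1 : -16 ≤ k) (h2 : k ≤ 16) :
    PySem.List.slice d (some (-k)) none ++ PySem.List.slice d none (some (-k)) =
      d.rotate ((-k) % 16).toNat := by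
  rcases lt_trichotomy k 0 with hk | hk | hk
  · have e1 : PySem.List.slice d (some (-k)) none = List.drop (-k).toNat d := by
      conv_lhs => rw [show -k = (((-k).toNat : Nat) : Int) from by omega]
      exact PySem.List.slice_from_natCast d (-k).toNat
    have e2 : PySem.List.slice d none (some (-k)) = List.take (-k).toNat d := by
      conv_lhs => rw [show -k = (((-k).toNat : Nat) : Int) from by omega]
      exact PySem.List.slice_to_natCast d (-k).toNat
    rw [e1, e2, ← List.rotate_eq_drop_append_take (by omega : (-k).toNat ≤ d.length)]
    conv_lhs => rw [← List.rotate_mod]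
    rw [h16]
    congr 1
    omega
  · subst hk
    simp only [neg_zero]
    rw [PySem.List.slice_from d (by norm_num), PySem.List.slice_to d (by norm_num)]
    simp
  · have e1 : PySem.List.slice d (some (-k)) none = List.drop (d.length - k.toNat) d := by
      conv_lhs => rw [show -k = -((k.toNat : Nat) : Int) from by omega]
      exact PySem.List.slice_from_neg_natCast d k.toNat (by omega)
    have e2 : PySem.List.slice d none (some (-k)) = List.take (d.length - k.toNat) d := by
      conv_lhs => rw [show -k = -((k.toNat : Nat) : Int) from by omega]
      exact PySem.List.slice_to_neg_natCast d k.toNat (by omega)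
    rw [e1, e2, h16, ← List.rotate_eq_drop_append_take (by omega : 16 - k.toNat ≤ d.length)]
    congr 1
    omega

-- the coupling invariant: A's list is B's array read starting at the offset
def pvRel (d : List String) (st : List String × Int) : Prop :=
  0 ≤ st.2 ∧ st.2 < 16 ∧ List.Perm d pvNames ∧ d = st.1.rotate st.2.toNat

lemma pvStep_rel (d : List String) (st : List String × Int) (step : String)
    (hok : pvStepOK step = true) (h : pvRel d st) :
    pvRel (pvStepA d step) (pvStepB st step) := by
  obtain ⟨l, r⟩ := st
  obtain ⟨h0, h1, hperm, hdl⟩ := h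
  have h0 : (0:Int) ≤ r := h0
  have h1 : r < 16 := h1
  have hdl : d = l.rotate r.toNat := hdl
  have hd16 : d.length = 16 := by simpa [pvNames] using hperm.length_eq
  have hl16 : l.length = 16 := by
    have hc := congrArg List.length hdl
    simp at hc
    omega
  have hnd : d.Nodup := hperm.nodup_iff.mpr pvNames_nodup
  have hdlp : List.Perm d l := by rw [hdl]; exact List.rotate_perm l r.toNat
  have hndl : l.Nodup := (hdlp.nodup_iff).mp hnd
  unfold pvStepOK at hok
  unfold pvStepA pvStepB
  by_cases hs : PySem.Str.startswith step "s" = true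
  · rw [if_pos hs] at hok
    rw [if_pos hs, if_pos hs]
    cases hk : PySem.Int.ofStr? (PySem.Str.slice step (some 1) none) with
    | none => rw [hk] at hok; exact absurd hok (by simp)
    | some k =>
      rw [hk] at hok
      simp only [decide_eq_true_eq] at hok
      obtain ⟨hk1, hk2⟩ := hok
      simp only [Option.getD_some]
      have hmod : PySem.Int.mod (r - k) 16 = (r - k) % 16 :=
        PySem.Int.mod_eq_emod_of_pos (by norm_num)
      rw [hmod, pvSliceRot d hd16 k hk1 hk2]
      refine ⟨(by omega : (0:Int) ≤ (r - k) % 16), (by omega : (r - k) % 16 < 16), ?_, ?_⟩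
      · exact (List.rotate_perm d _).trans hperm
      · show d.rotate ((-k) % 16).toNat = l.rotate ((r - k) % 16).toNat
        rw [hdl, List.rotate_rotate, ← List.rotate_mod l (r.toNat + ((-k) % 16).toNat), hl16,
            show (r.toNat + ((-k) % 16).toNat) % 16 = ((r - k) % 16).toNat from by omega]
  · by_cases hx : PySem.Str.startswith step "x" = true
    · rw [if_neg hs, if_pos hx] at hok
      rw [if_neg hs, if_pos hx, if_neg hs, if_pos hx]
      generalize hps : (PySem.Str.split? (PySem.Str.slice step (some 1) none) "/").getD [] = ps at hok ⊢
      rcases ps with _ | ⟨p0, _ | ⟨p1, _ | ⟨p2, ps3⟩⟩⟩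
      · simp at hok
      · cases ho0 : PySem.Int.ofStr? p0 <;> simp [ho0] at hok
      · cases ho0 : PySem.Int.ofStr? p0 with
        | none => simp [ho0] at hok
        | some i =>
          cases ho1 : PySem.Int.ofStr? p1 with
          | none => simp [ho0, ho1] at hok
          | some j =>
            simp only [List.map_cons, List.map_nil, ho0, ho1, decide_eq_true_eq] at hok
            obtain ⟨hi1, hi2, hj1, hj2⟩ := hok
            simp only [List.map_cons, List.map_nil, ho0, ho1,
              show PySem.List.pyGetD [p0, p1] (0:Int) "" = p0 from rfl,
              show PySem.List.pyGetD [p0, p1] (1:Int) "" = p1 from rfl,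
              Option.getD_some,
              PySem.Int.mod_eq_emod_of_pos (show (0:Int) < 16 from by norm_num)]
            rw [pvPySwap_map d hnd hd16 i j hi1 hi2 hj1 hj2,
                pvPySwap_map l hndl hl16 ((i + r) % 16) ((j + r) % 16)
                  (by omega) (by omega) (by omega) (by omega)]
            have hIA : d[(i % 16).toNat]'(by omega) = l[(((i + r) % 16) % 16).toNat]'(by omega) := by
              simp only [hdl]
              rw [List.getElem_rotate]
              simp only [hl16]
              simp only [show ((i % 16).toNat + r.toNat) % 16 = (((i + r) % 16) % 16).toNat from by omega]
            have hJB : d[(j % 16).toNat]'(by omega) = l[(((j + r) % 16) % 16).toNat]'(by omega) := by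
              simp only [hdl]
              rw [List.getElem_rotate]
              simp only [hl16]
              simp only [show ((j % 16).toNat + r.toNat) % 16 = (((j + r) % 16) % 16).toNat from by omega]
            simp only [hIA, hJB]
            refine ⟨h0, h1, ?_, ?_⟩
            · exact (pvMap_perm d hnd _ _ ((hdlp.mem_iff).mpr (List.getElem_mem _))
                ((hdlp.mem_iff).mpr (List.getElem_mem _))).trans hperm
            · show d.map _ = (l.map _).rotate r.toNat
              rw [hdl, List.map_rotate]
      · cases ho0 : PySem.Int.ofStr? p0 <;> cases ho1 : PySem.Int.ofStr? p1 <;>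
          simp [ho0, ho1] at hok
    · by_cases hp : PySem.Str.startswith step "p" = true
      · rw [if_neg hs, if_neg hx, if_pos hp] at hok
        rw [if_neg hs, if_neg hx, if_pos hp, if_neg hs, if_neg hx, if_pos hp]
        generalize hps : (PySem.Str.split? (PySem.Str.slice step (some 1) none) "/").getD [] = ps at hok ⊢
        rcases ps with _ | ⟨a0, _ | ⟨b0, _ | ⟨c0, ps3⟩⟩⟩
        · simp at hok
        · simp at hok
        · simp only [Bool.and_eq_true, List.contains_iff_mem] at hok
          obtain ⟨ham, hbm⟩ := hok
          have had : a0 ∈ d := hperm.mem_iff.mpr ham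
          have hbd : b0 ∈ d := hperm.mem_iff.mpr hbm
          obtain ⟨pa, hpa⟩ := Option.isSome_iff_exists.mp ((PySem.List.index?_isSome_iff d a0).mpr had)
          obtain ⟨pb, hpb⟩ := Option.isSome_iff_exists.mp ((PySem.List.index?_isSome_iff d b0).mpr hbd)
          obtain ⟨hpaL, hda, -⟩ := PySem.List.getElem_of_index?_eq_some hpa
          obtain ⟨hpbL, hdb, -⟩ := PySem.List.getElem_of_index?_eq_some hpb
          simp only [hpa, hpb]
          rw [pvPySwap_map d hnd hd16 (pa : Int) (pb : Int)
              (by omega) (by omega) (by omega) (by omega)]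
          have hfun : (fun c => if c == a0 then b0 else if c == b0 then a0 else c) = pvT a0 b0 := by
            funext c
            simp [pvT]
          rw [hfun]
          simp only [show (((pa : Int)) % 16).toNat = pa from by omega,
                     show (((pb : Int)) % 16).toNat = pb from by omega, hda, hdb]
          refine ⟨h0, h1, ?_, ?_⟩
          · exact (pvMap_perm d hnd a0 b0 had hbd).trans hperm
          · show d.map _ = (l.map _).rotate r.toNat
            rw [hdl, List.map_rotate]
        · simp at hok
      · rw [if_neg hs, if_neg hx, if_neg hp, if_neg hs, if_neg hx, if_neg hp]
        exact ⟨h0, h1, hperm, hdl⟩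

lemma pvFold_rel : ∀ (steps : List String) (d : List String) (st : List String × Int),
    pvRel d st → steps.all pvStepOK = true →
    pvRel (steps.foldl pvStepA d) (steps.foldl pvStepB st)
  | [], _, _, h, _ => h
  | s :: ss, d, st, h, hall => by
      simp only [List.all_cons, Bool.and_eq_true] at hall
      exact pvFold_rel ss _ _ (pvStep_rel _ _ _ hall.1 h) hall.2

-- ===== VERDICT (by name: the statement is the Claim_ definition above) =====
theorem perform_dance_spec : Claim_equal_perform_dance := by
  intro ds _hdom hpre
  unfold Spec_perform_dance perform_dance perform_dance_alt
  have h0 : pvRel pvDancers0 (pvCells0, 0) := by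
    refine ⟨by norm_num, by norm_num, ?_, ?_⟩
    · rw [pvDancers0_eq]
    · rw [pvDancers0_eq, pvCells0_eq]; simp
  have hrel := pvFold_rel ds pvDancers0 (pvCells0, 0) h0 hpre
  obtain ⟨hr0, hr1, hperm', heq'⟩ := hrel
  have hlen : (ds.foldl pvStepB (pvCells0, 0)).1.length = 16 := by
    have := hperm'.length_eq
    rw [heq'] at this
    simpa using this
  congr 1
  rw [heq', PySem.List.slice_from _ hr0, PySem.List.slice_to _ hr0]
  exact List.rotate_eq_drop_append_take (by omega)
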